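-- pv_equiv track=rewrite | github.com/llouis0622/Algorithm_Deep_Dive | Programmers/Lv. 3/[Summer&WinterCoding] 숫자 게임.py | solution
-- ===== SOURCE A (Python) =====
-- def solution(A, B):
--     A.sort()
--     B.sort()
--     i = j = ans = 0
--     n = len(A)
--     while i < n and j < n:
--         if B[j] > A[i]:
--             ans += 1
--             i += 1
--             j += 1
--         else:
--             j += 1
--     return ans
-- ===== SOURCE B (Python) =====
-- def solution(A, B):
--     # Sorts A and B in place (same side effect as the original).
--     # Binary search for the answer: the greedy count equals the largest k such
--     # that the k largest of B's n smallest values pairwise beat the k smallest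
--     # values of A (cand[n-k+t] > A[t] for all t < k); that predicate is
--     # monotone in k, so binary search over k in [0, n] finds the maximum.
--     A.sort()
--     B.sort()
--     n = len(A)
--     cand = B[:n]
--     lo, hi = 0, n
--     while lo < hi:
--         mid = (lo + hi + 1) // 2
--         if all(A[t] < cand[n - mid + t] for t in range(mid)):
--             lo = mid
--         else:
--             hi = mid - 1
--     return lo
-- ===== Notes on version B (the rewrite author's own statement) =====
-- stated objective: alternative
-- what changed: Replaces the greedy two-pointer scan with a binary search over the answer k, testing the closed-form certificate 'the k largest of B's n smallest values pairwise beat the k smallest values of A', which is monotone in k.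
import Mathlib
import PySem

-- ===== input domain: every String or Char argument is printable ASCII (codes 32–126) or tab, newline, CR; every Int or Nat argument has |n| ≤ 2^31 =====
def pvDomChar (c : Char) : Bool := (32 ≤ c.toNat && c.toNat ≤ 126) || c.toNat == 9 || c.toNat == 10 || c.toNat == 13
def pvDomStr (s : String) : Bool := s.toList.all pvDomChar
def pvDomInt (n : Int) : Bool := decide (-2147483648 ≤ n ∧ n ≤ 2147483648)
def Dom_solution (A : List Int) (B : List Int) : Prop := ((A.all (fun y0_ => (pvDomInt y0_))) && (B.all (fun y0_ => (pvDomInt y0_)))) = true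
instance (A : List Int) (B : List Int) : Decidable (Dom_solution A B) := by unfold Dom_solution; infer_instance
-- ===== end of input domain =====

-- B replaces A's greedy two-pointer scan by a binary search over the answer k, testing the
-- monotone certificate "the k largest of B's n smallest values pairwise beat the k smallest
-- values of A" (objective: alternative algorithm, same cost).
-- Both Pythons sort their list arguments in place; the equivalence proved here is about
-- the RETURN value (both perform the same mutation).

-- ===== PORT A =====
-- the while-loop of A: state (i, j, ans), n = len(A); terminates because j increases
def solGo (As Bs : List Int) (n i j : Nat) (ans : Int) : Int :=
  if _h : i < n ∧ j < n then
    if Bs.getD j 0 > As.getD i 0 then solGo As Bs n (i+1) (j+1) (ans+1)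
    else solGo As Bs n i (j+1) ans
  else ans
  termination_by n - j
  decreasing_by all_goals omega

def solution (A : List Int) (B : List Int) : Int :=
  solGo (PySem.List.sorted A (fun x => x) false) (PySem.List.sorted B (fun x => x) false)
    A.length 0 0 0

-- ===== PORT B =====
-- 'all(A[t] < cand[n - mid + t] for t in range(mid))'; the loop invariant mid ≤ n keeps
-- every index in range (0 ≤ n - mid + t < n, 0 ≤ t < mid ≤ len(A)), so getD is exact here
def okCheck (cand As : List Int) (n k : Nat) : Bool :=
  (List.range k).all (fun t => decide (As.getD t 0 < cand.getD (n - k + t) 0))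

-- the 'while lo < hi' binary-search loop of Source B
def bsGo (cand As : List Int) (n lo hi : Nat) : Nat :=
  if _h : lo < hi then
    let mid := (lo + hi + 1) / 2
    if okCheck cand As n mid then bsGo cand As n mid hi else bsGo cand As n lo (mid - 1)
  else lo
  termination_by hi - lo
  decreasing_by all_goals omega

def solution_alt (A : List Int) (B : List Int) : Int :=
  let As := PySem.List.sorted A (fun x => x) false
  let Bs := PySem.List.sorted B (fun x => x) false
  let n := A.length
  let cand := PySem.List.slice Bs none (some (n : Int))
  (bsGo cand As n 0 n : Int)

-- ===== PRECONDITION & SPEC =====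
-- Pre_ excludes exactly the inputs on which both Pythons raise IndexError (B shorter
-- than A: A's loop bound j < len(A) runs B[j] past the end of B, and Source B's certificate
-- indexes cand = B[:len(A)] past its end likewise).
def Pre_solution (A : List Int) (B : List Int) : Prop := A.length ≤ B.length
instance (A : List Int) (B : List Int) : Decidable (Pre_solution A B) := by unfold Pre_solution; infer_instance
def pvWitness_solution : List Int × List Int := ([3, 1, 5], [2, 6, 4])

def Spec_solution (A : List Int) (B : List Int) (out : Int) : Prop := out = solution_alt A B
instance (A : List Int) (B : List Int) (out : Int) : Decidable (Spec_solution A B out) := by unfold Spec_solution; infer_instance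

-- ===== CLAIM (what is proved, stated in full; the proofs are below) =====
def Claim_equal_solution : Prop := ∀ (A : List Int) (B : List Int), Dom_solution A B → Pre_solution A B → Spec_solution A B (solution A B)

-- ===== LEMMAS AND PROOFS =====

-- list form of A's greedy (proof device): consume heads instead of moving indices
def gList : List Int → List Int → Nat
  | _, [] => 0
  | [], _ => 0
  | a :: as, c :: cs => if a < c then gList as cs + 1 else gList (a :: as) cs

-- the certificate okCheck decides, as a Prop over general lists
def okP (As Cs : List Int) (k : Nat) : Prop :=
  k ≤ Cs.length ∧ k ≤ As.length ∧ ∀ t < k, As.getD t 0 < Cs.getD (Cs.length - k + t) 0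

-- A's loop is gList on the suffixes (Cs = the first n elements of Bs)
lemma solGo_eq_gList (As Bs Cs : List Int) (n : Nat) (hA : As.length = n)
    (hC : Cs = Bs.take n) (hB : n ≤ Bs.length) :
    ∀ j i ans, solGo As Bs n i j ans = ans + gList (As.drop i) (Cs.drop j) := by
  have hClen : Cs.length = n := by rw [hC, List.length_take]; omega
  intro j
  induction hk : n - j using Nat.strong_induction_on generalizing j with
  | _ m ih =>
    intro i ans
    by_cases hj : j < n
    · have hCdrop : Cs.drop j = Cs.getD j 0 :: Cs.drop (j+1) := by
        rw [List.drop_eq_getElem_cons (by omega : j < Cs.length),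
          List.getD_eq_getElem Cs 0 (by omega : j < Cs.length)]
      have hCB : Cs.getD j 0 = Bs.getD j 0 := by
        subst hC
        rw [List.getD_eq_getElem _ 0 (by simp; omega : j < (Bs.take n).length),
          List.getD_eq_getElem _ 0 (by omega : j < Bs.length)]
        simp
      by_cases hi : i < n
      · have hAdrop : As.drop i = As.getD i 0 :: As.drop (i+1) := by
          rw [List.drop_eq_getElem_cons (by omega : i < As.length),
            List.getD_eq_getElem As 0 (by omega : i < As.length)]
        conv_lhs => unfold solGo
        rw [dif_pos ⟨hi, hj⟩]
        by_cases hw : Bs.getD j 0 > As.getD i 0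
        · rw [if_pos hw, ih (n - (j+1)) (by omega) (j+1) rfl (i+1) (ans+1),
            hAdrop, hCdrop, gList, if_pos (by omega : As.getD i 0 < Cs.getD j 0)]
          push_cast; ring
        · rw [if_neg hw, ih (n - (j+1)) (by omega) (j+1) rfl i ans, hAdrop, hCdrop,
            gList, if_neg (by omega : ¬ As.getD i 0 < Cs.getD j 0), ← hAdrop]
      · conv_lhs => unfold solGo
        rw [dif_neg (by omega : ¬ (i < n ∧ j < n)),
          List.drop_eq_nil_of_le (by omega : As.length ≤ i)]
        rw [hCdrop]; simp [gList]
    · conv_lhs => unfold solGo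
      rw [dif_neg (by omega : ¬ (i < n ∧ j < n)),
        List.drop_eq_nil_of_le (by omega : Cs.length ≤ j)]
      cases As.drop i <;> simp [gList]

-- optimality: any certificate of size k is bounded by the greedy count
lemma okP_le_gList (Cs : List Int) : ∀ As k, okP As Cs k → k ≤ gList As Cs := by
  induction Cs with
  | nil =>
    intro As k h
    have h1 : k = 0 := by simpa using h.1
    simp [h1]
  | cons c cs ih =>
    intro As k h
    obtain ⟨h1, h2, h3⟩ := h
    cases As with
    | nil =>
      have h2' : k = 0 := by simpa using h2
      simp [gList, h2']
    | cons a as =>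
      by_cases hw : a < c
      · rw [gList, if_pos hw]
        rcases Nat.eq_zero_or_pos k with hk0 | hkpos
        · omega
        · have : okP as cs (k - 1) := by
            refine ⟨by simp at h1 ⊢; omega, by simp at h2 ⊢; omega, ?_⟩
            intro t ht
            have := h3 (t+1) (by omega)
            have hidx : (c :: cs).length - k + (t + 1) = (cs.length - (k-1) + t) + 1 := by
              simp at h1 ⊢; omega
            rw [hidx] at this
            simpa using this
          have := ih as (k-1) this
          omega
      · rw [gList, if_neg hw]
        rcases Nat.lt_or_ge k ((c :: cs).length) with hk | hk
        · refine ih (a :: as) k ⟨by simp at hk ⊢; omega, h2, ?_⟩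
          intro t ht
          have := h3 t ht
          have hidx : (c :: cs).length - k + t = (cs.length - k + t) + 1 := by
            simp at hk ⊢; omega
          rw [hidx] at this
          simpa using this
        · exfalso
          have hkeq : k = cs.length + 1 := by simp at h1 hk; omega
          have := h3 0 (by omega)
          simp [hkeq] at this
          omega
  -- (the c ≤ a, k = |c::cs| case is impossible: the certificate's t = 0 entry is c > a)

-- achievability: the greedy count itself carries a certificate (Cs sorted ascending)
lemma gList_okP (Cs : List Int) : ∀ As, Cs.Pairwise (· ≤ ·) → okP As Cs (gList As Cs) := by
  induction Cs with
  | nil => intro As _; cases As <;> exact ⟨by simp [gList], by simp [gList], by simp [gList]⟩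
  | cons c cs ih =>
    intro As hs
    cases As with
    | nil => exact ⟨by simp [gList], by simp [gList], by simp [gList]⟩
    | cons a as =>
      have hs' : cs.Pairwise (· ≤ ·) := hs.tail
      by_cases hw : a < c
      · rw [gList, if_pos hw]
        obtain ⟨h1, h2, h3⟩ := ih as hs'
        refine ⟨by simp; omega, by simp; omega, ?_⟩
        intro t ht
        set g := gList as cs
        cases t with
        | zero =>
          -- index is |c::cs| - (g+1) = |cs| - g; the element there is ≥ c > a
          rcases Nat.lt_or_ge g cs.length with hg2 | hg2
          · have hidx : (c :: cs).length - (g + 1) + 0 = (cs.length - g - 1) + 1 := by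
              simp; omega
            rw [hidx]
            have hmem : cs.getD (cs.length - g - 1) 0 ∈ cs := by
              rw [List.getD_eq_getElem _ 0 (by omega)]; exact List.getElem_mem _
            have hcle : c ≤ cs.getD (cs.length - g - 1) 0 :=
              List.rel_of_pairwise_cons hs hmem
            simpa using lt_of_lt_of_le hw hcle
          · have hgeq : g = cs.length := by omega
            have hidx : (c :: cs).length - (g + 1) + 0 = 0 := by simp; omega
            rw [hidx]
            simpa using hw
        | succ t' =>
          have := h3 t' (by omega)
          have hidx : (c :: cs).length - (g + 1) + (t' + 1) = (cs.length - g + t') + 1 := by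
            simp; omega
          rw [hidx]
          simpa using this
      · rw [gList, if_neg hw]
        obtain ⟨h1, h2, h3⟩ := ih (a :: as) hs'
        refine ⟨by simp; omega, h2, ?_⟩
        intro t ht
        have := h3 t ht
        have hidx : (c :: cs).length - gList (a :: as) cs + t
            = (cs.length - gList (a :: as) cs + t) + 1 := by simp; omega
        rw [hidx]
        simpa using this

-- monotonicity: a certificate of size k + 1 shrinks to one of size k (As sorted ascending)
lemma okP_mono (As Cs : List Int) (hAs : As.Pairwise (· ≤ ·)) (k : Nat)
    (h : okP As Cs (k + 1)) : okP As Cs k := by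
  obtain ⟨h1, h2, h3⟩ := h
  refine ⟨by omega, by omega, ?_⟩
  intro t ht
  have hk := h3 (t + 1) (by omega)
  have hidx : Cs.length - (k + 1) + (t + 1) = Cs.length - k + t := by omega
  rw [hidx] at hk
  have hle : As.getD t 0 ≤ As.getD (t + 1) 0 := by
    rw [List.getD_eq_getElem _ 0 (by omega), List.getD_eq_getElem _ 0 (by omega)]
    exact List.pairwise_iff_getElem.mp hAs t (t+1) (by omega) (by omega) (by omega)
  omega

lemma okP_of_le (As Cs : List Int) (hAs : As.Pairwise (· ≤ ·)) :
    ∀ d k, okP As Cs (k + d) → okP As Cs k := by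
  intro d
  induction d with
  | zero => intro k h; exact h
  | succ d ih =>
    intro k h
    exact ih k (okP_mono As Cs hAs (k + d) (by rw [Nat.add_succ] at h; exact h))

-- with lengths n, okCheck decides okP
lemma okCheck_iff (As Cs : List Int) (n k : Nat) (hA : As.length = n)
    (hC : Cs.length = n) (hk : k ≤ n) :
    okCheck Cs As n k = true ↔ okP As Cs k := by
  unfold okCheck okP
  simp only [List.all_eq_true, List.mem_range, decide_eq_true_eq]
  constructor
  · intro h; exact ⟨by omega, by omega, by rw [hC]; exact h⟩
  · intro h; rw [← hC]; exact h.2.2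

-- binary-search correctness given the monotone characterisation
lemma bsGo_eq (Cs As : List Int) (n g : Nat) (_hg : g ≤ n)
    (hok : ∀ k, k ≤ n → (okCheck Cs As n k = true ↔ k ≤ g)) :
    ∀ lo hi, lo ≤ g → g ≤ hi → hi ≤ n → bsGo Cs As n lo hi = g := by
  intro lo hi
  induction hd : hi - lo using Nat.strong_induction_on generalizing lo hi with
  | _ m ih =>
    intro hlo hhi hn
    by_cases hlt : lo < hi
    · unfold bsGo
      rw [dif_pos hlt]
      set mid := (lo + hi + 1) / 2 with hmid
      have hmr : lo < mid ∧ mid ≤ hi := by omega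
      by_cases hc : okCheck Cs As n mid = true
      · rw [if_pos hc]
        have : mid ≤ g := (hok mid (by omega)).mp hc
        exact ih (hi - mid) (by omega) mid hi rfl this hhi hn
      · rw [if_neg hc]
        have : ¬ mid ≤ g := fun hle => hc ((hok mid (by omega)).mpr hle)
        exact ih (mid - 1 - lo) (by omega) lo (mid - 1) rfl hlo (by omega) (by omega)
    · unfold bsGo
      rw [dif_neg hlt]
      omega

-- ===== VERDICT (by name: the statement is the Claim_ definition above) =====
theorem solution_spec : Claim_equal_solution := by
  intro A B _ hpre
  unfold Spec_solution solution solution_alt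
  have hlenA : (PySem.List.sorted A (fun x => x) false).length = A.length :=
    PySem.List.length_sorted ..
  have hlenB : (PySem.List.sorted B (fun x => x) false).length = B.length :=
    PySem.List.length_sorted ..
  set As := PySem.List.sorted A (fun x => x) false with hAs
  set Bs := PySem.List.sorted B (fun x => x) false with hBs
  set n := A.length with hn
  have hslice : PySem.List.slice Bs none (some (n : Int)) = Bs.take n := by
    exact_mod_cast PySem.List.slice_to_natCast Bs n
  show solGo As Bs n 0 0 0
      = ((bsGo (PySem.List.slice Bs none (some (n : Int))) As n 0 n : Nat) : Int)
  rw [hslice]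
  set Cs := Bs.take n with hCs
  have hpre' : A.length ≤ B.length := hpre
  have hClen : Cs.length = n := by
    rw [hCs, List.length_take, hlenB]; exact Nat.min_eq_left hpre'
  have hAsort : As.Pairwise (· ≤ ·) := PySem.List.sorted_pairwise ..
  have hCsort : Cs.Pairwise (· ≤ ·) :=
    List.Pairwise.sublist (List.take_sublist n Bs) (PySem.List.sorted_pairwise ..)
  set g := gList As Cs with hg
  have hach : okP As Cs g := gList_okP Cs As hCsort
  have hgle : g ≤ n := by have := hach.1; omega
  have hgreedy : solGo As Bs n 0 0 0 = (g : Int) := by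
    rw [solGo_eq_gList As Bs Cs n hlenA hCs (by omega) 0 0 0]
    simp [hg]
  rw [hgreedy]
  have hbs : bsGo Cs As n 0 n = g := by
    refine bsGo_eq Cs As n g hgle ?_ 0 n (by omega) hgle le_rfl
    intro k hk
    rw [okCheck_iff As Cs n k hlenA hClen hk]
    constructor
    · exact fun h => okP_le_gList Cs As k h
    · intro hle
      exact okP_of_le As Cs hAsort (g - k) k (by rw [Nat.add_sub_cancel' hle]; exact hach)
  rw [hbs]
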